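-- pv_equiv track=rewrite | github.com/anton31kah/AdventOfCode | src/day17/part1.py | prepare_grid
-- ===== SOURCE A (Python) =====
-- def prepare_grid(lines, cycles):
--     length = len(lines) + cycles * 2
--
--     grid = []
--     for z_index in range(length):
--         grid.append([])
--         for row_index in range(length):
--             grid[z_index].append([])
--             for col in range(length):
--                 grid[z_index][row_index].append(False)
--
--     starting_position = len(grid) // 2 - len(lines) // 2
--     x, y, z = starting_position, starting_position, starting_position
--
--     lines_i = 0
--     lines_j = 0
--     for row in range(y, y + len(lines)):
--         lines_j = 0
--         for col in range(x, x + len(lines)):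
--             grid[z][row][col] = lines[lines_i][lines_j] == '#'
--             lines_j += 1
--         lines_i += 1
--
--     return grid
-- ===== SOURCE B (Python) =====
-- def prepare_grid(lines, cycles):
--     n = len(lines)
--     length = n + cycles * 2
--     s = length // 2 - n // 2
--
--     def blank_planes(count):
--         return [[[False] * length for _ in range(length)] for _ in range(count)]
--
--     if n == 0:
--         return blank_planes(length)
--
--     centre = ([[False] * length for _ in range(s)]
--               + [[False] * s
--                  + [line[j] == '#' for j in range(n)]
--                  + [False] * (length - s - n)
--                  for line in lines]
--               + [[False] * length for _ in range(length - s - n)])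
--     return blank_planes(s) + [centre] + blank_planes(length - s - 1)
-- ===== Notes on version B (the rewrite author's own statement) =====
-- stated objective: alternative
-- what changed: B assembles the grid by block concatenation - it builds the single centre plane by padding each input row with False borders and glues whole blank planes before and after it - instead of A's allocate-everything-then-patch per-cell index-assignment loops (there is no per-cell coordinate test and no triple write loop in B).
import Mathlib
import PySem

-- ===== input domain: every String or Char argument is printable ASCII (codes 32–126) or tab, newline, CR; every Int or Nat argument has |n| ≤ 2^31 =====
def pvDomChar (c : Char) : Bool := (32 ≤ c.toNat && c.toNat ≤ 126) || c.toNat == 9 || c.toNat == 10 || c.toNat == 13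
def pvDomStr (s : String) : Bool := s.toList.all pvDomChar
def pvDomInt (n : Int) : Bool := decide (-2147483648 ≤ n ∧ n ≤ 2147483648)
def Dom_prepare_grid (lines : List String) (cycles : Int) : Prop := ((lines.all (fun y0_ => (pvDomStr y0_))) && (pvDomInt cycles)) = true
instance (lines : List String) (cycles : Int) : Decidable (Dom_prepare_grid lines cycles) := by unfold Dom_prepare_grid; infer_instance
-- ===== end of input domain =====

-- B builds the grid by block concatenation (blank planes glued around one centre plane made of
-- border-padded rows) instead of A's allocate-all-then-patch per-cell loops; objective: alternative.

-- ===== PORT A =====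
-- lines[i][j] == '#' (shared cell read; total form of indexing, exact under Pre_)
def pvCell (lines : List String) (i j : Int) : Bool :=
  PySem.List.pyGetD (PySem.List.pyGetD lines i "").toList j ' ' == '#'

-- grid[z][row][col] = v  (Python nested index assignment; total form, exact under Pre_)
def pvSet3 (g : List (List (List Bool))) (z r c : Int) (v : Bool) : List (List (List Bool)) :=
  PySem.List.pySetD g z
    (PySem.List.pySetD (PySem.List.pyGetD g z []) r
      (PySem.List.pySetD (PySem.List.pyGetD (PySem.List.pyGetD g z []) r []) c v))

def prepare_grid (lines : List String) (cycles : Int) : List (List (List Bool)) :=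
  let length : Int := (lines.length : Int) + cycles * 2
  let grid : List (List (List Bool)) :=
    (PySem.List.pyRange 0 length 1).foldl (fun grid _z =>
      grid ++ [(PySem.List.pyRange 0 length 1).foldl (fun plane _r =>
        plane ++ [(PySem.List.pyRange 0 length 1).foldl (fun row _c => row ++ [false]) []]) []]) []
  let s : Int := PySem.Int.floordiv (grid.length : Int) 2 - PySem.Int.floordiv (lines.length : Int) 2
  -- x = y = z = s;  for row in range(y, y+len(lines)): for col in range(x, x+len(lines)): …
  let res := (PySem.List.pyRange s (s + (lines.length : Int)) 1).foldl
    (fun (st : List (List (List Bool)) × Int) row =>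
      let inner := (PySem.List.pyRange s (s + (lines.length : Int)) 1).foldl
        (fun (st2 : List (List (List Bool)) × Int) col =>
          (pvSet3 st2.1 s row col (pvCell lines st.2 st2.2), st2.2 + 1))
        (st.1, 0)
      (inner.1, st.2 + 1))
    (grid, 0)
  res.1

-- ===== PORT B =====
-- [False] * k → List.replicate k.toNat false (Python's list-multiply clamps negative k to empty);
-- line[j] → PySem.List.pyGetD line.toList j ' ' (total form of indexing, exact under Pre_)
def prepare_grid_alt (lines : List String) (cycles : Int) : List (List (List Bool)) :=
  let n : Int := (lines.length : Int)
  let length : Int := n + cycles * 2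
  let s : Int := PySem.Int.floordiv length 2 - PySem.Int.floordiv n 2
  let blank_planes : Int → List (List (List Bool)) := fun count =>
    (PySem.List.pyRange 0 count 1).map (fun _ =>
      (PySem.List.pyRange 0 length 1).map (fun _ => List.replicate length.toNat false))
  if lines.length = 0 then
    blank_planes length
  else
    let centre : List (List Bool) :=
      ((PySem.List.pyRange 0 s 1).map (fun _ => List.replicate length.toNat false))
      ++ lines.map (fun line =>
           List.replicate s.toNat false
           ++ (PySem.List.pyRange 0 n 1).map (fun j => PySem.List.pyGetD line.toList j ' ' == '#')
           ++ List.replicate (length - s - n).toNat false)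
      ++ ((PySem.List.pyRange 0 (length - s - n) 1).map (fun _ => List.replicate length.toNat false))
    blank_planes s ++ [centre] ++ blank_planes (length - s - 1)

-- ===== PRECONDITION & SPEC =====
-- Pre_ excludes exactly the inputs on which A raises IndexError: a negative cycles count with
-- nonempty lines (the patch loops index past the smaller grid), and any line shorter than the
-- number of lines (A indexes lines[i][j] for j < len(lines)).
def Pre_prepare_grid (lines : List String) (cycles : Int) : Prop :=
  (lines = [] ∨ 0 ≤ cycles) ∧ ∀ l ∈ lines, (lines.length : Int) ≤ PySem.Str.len l
instance (lines : List String) (cycles : Int) : Decidable (Pre_prepare_grid lines cycles) := by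
  unfold Pre_prepare_grid; infer_instance
def pvWitness_prepare_grid : List String × Int := (["#.", ".#"], 1)

def Spec_prepare_grid (lines : List String) (cycles : Int) (out : List (List (List Bool))) : Prop := out = prepare_grid_alt lines cycles
instance (lines : List String) (cycles : Int) (out : List (List (List Bool))) : Decidable (Spec_prepare_grid lines cycles out) := by unfold Spec_prepare_grid; infer_instance

-- ===== CLAIM (what is proved, stated in full; the proofs are below) =====
def Claim_equal_prepare_grid : Prop := ∀ (lines : List String) (cycles : Int), Dom_prepare_grid lines cycles → Pre_prepare_grid lines cycles → Spec_prepare_grid lines cycles (prepare_grid lines cycles)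

-- ===== LEMMAS AND PROOFS =====

-- the canonical shape every intermediate grid of A has: all-false outside plane s, f inside it
def pvGridF (L s : Int) (f : Int → Int → Bool) : List (List (List Bool)) :=
  (PySem.List.pyRange 0 L 1).map (fun z =>
    (PySem.List.pyRange 0 L 1).map (fun r =>
      (PySem.List.pyRange 0 L 1).map (fun c => if z = s then f r c else false)))

theorem pvMapConst {α : Type} (L : Int) (x : α) :
    (PySem.List.pyRange 0 L 1).map (fun _ => x) = List.replicate L.toNat x := by
  rw [List.map_const']
  simp [PySem.List.length_pyRange_one]

-- a map over range(0, L) whose values are x outside the window [s, s+m) equals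
-- padding ++ mid ++ padding
theorem pvWindow {α : Type} (L s m : Int) (g : Int → α) (mid : List α) (x : α)
    (hm : (mid.length : Int) = m)
    (hs0 : 0 ≤ s) (hsL : s + m ≤ L)
    (hlow : ∀ z : Int, 0 ≤ z → z < s → g z = x)
    (hhigh : ∀ z : Int, s + m ≤ z → z < L → g z = x)
    (hmid : ∀ (k : Nat), (h : k < mid.length) → g (s + (k : Int)) = mid[k]) :
    (PySem.List.pyRange 0 L 1).map g
      = List.replicate s.toNat x ++ mid ++ List.replicate (L - s - m).toNat x := by
  apply List.ext_getElem
  · simp [PySem.List.length_pyRange_one]; omega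
  · intro i h1 h2
    have hi : i < L.toNat := by
      simpa [PySem.List.length_pyRange_one] using h1
    simp only [List.getElem_map, PySem.List.getElem_pyRange_one, zero_add,
      List.getElem_append, List.length_append, List.length_replicate, List.getElem_replicate]
    split_ifs with ha hb
    · exact hlow i (by omega) (by omega)
    · rw [show ((i : Int)) = s + ((i - s.toNat : Nat) : Int) by omega]
      exact hmid (i - s.toNat) (by omega)
    · exact hhigh i (by omega) (by omega)

theorem pvSet_map_pyRange {α : Type} (F : Int → α) (L i : Int) (v : α)
    (h0 : 0 ≤ i) (_h : i < L) :
    PySem.List.pySetD ((PySem.List.pyRange 0 L 1).map F) i v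
      = (PySem.List.pyRange 0 L 1).map (fun x => if x = i then v else F x) := by
  rw [PySem.List.pySetD_of_nonneg _ v h0]
  apply List.ext_getElem
  · simp
  · intro k h1 h2
    simp only [List.getElem_set, List.getElem_map, PySem.List.getElem_pyRange_one]
    have hk : k < (L - 0).toNat := by simpa [PySem.List.length_pyRange_one] using h2
    by_cases hki : (k : Int) = i
    · rw [if_pos, if_pos] <;> omega
    · rw [if_neg, if_neg] <;> omega

theorem pvSet3_gridF (L s row col : Int) (f : Int → Int → Bool) (v : Bool)
    (hs0 : 0 ≤ s) (hsL : s < L) (hr0 : 0 ≤ row) (hrL : row < L) (hc0 : 0 ≤ col) (hcL : col < L) :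
    pvSet3 (pvGridF L s f) s row col v
      = pvGridF L s (fun r c => if r = row ∧ c = col then v else f r c) := by
  unfold pvSet3 pvGridF
  rw [PySem.List.pyGetD_map_pyRange_of_nonneg _ L s _ hs0 hsL]
  simp only [if_true]
  rw [PySem.List.pyGetD_map_pyRange_of_nonneg _ L row _ hr0 hrL]
  rw [pvSet_map_pyRange _ L col v hc0 hcL]
  rw [pvSet_map_pyRange _ L row _ hr0 hrL]
  rw [pvSet_map_pyRange _ L s _ hs0 hsL]
  congr 1
  funext z
  by_cases hz : z = s
  · subst hz
    simp only [if_true]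
    congr 1
    funext r
    by_cases hr : r = row
    · subst hr
      simp only [if_true]
      congr 1
      funext c
      by_cases hc : c = col <;> simp [hc]
    · simp only [if_neg hr]
      congr 1
      funext c
      simp [hr]
  · simp [hz]

theorem pvColFold (lines : List String) (L s n i row : Int) (m : Nat) :
    ∀ (a j : Int) (f : Int → Int → Bool),
      0 ≤ s → s + n ≤ L → s ≤ a → a + m = s + n → j = a - s → 0 ≤ row → row < L →
      ((PySem.List.pyRange a (s + n) 1).foldl
          (fun (st2 : List (List (List Bool)) × Int) col =>
            (pvSet3 st2.1 s row col (pvCell lines i st2.2), st2.2 + 1))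
          (pvGridF L s f, j)).1
        = pvGridF L s (fun r c =>
            if r = row ∧ a ≤ c ∧ c < s + n then pvCell lines i (c - s) else f r c) := by
  induction m with
  | zero =>
    intro a j f h1 h2 h3 h4 h5 h6 h7
    rw [PySem.List.pyRange_one_eq_nil (by omega)]
    simp only [List.foldl_nil]
    congr 1
    funext r c
    rw [if_neg (by omega)]
  | succ m ih =>
    intro a j f h1 h2 h3 h4 h5 h6 h7
    rw [PySem.List.pyRange_one_cons (by omega : a < s + n)]
    simp only [List.foldl_cons]
    rw [pvSet3_gridF L s row a f (pvCell lines i j) h1 (by omega) h6 h7 (by omega) (by omega)]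
    rw [ih (a + 1) (j + 1) _ h1 h2 (by omega) (by omega) (by omega) h6 h7]
    congr 1
    funext r c
    subst h5
    by_cases hca : r = row ∧ c = a
    · rw [if_neg (by omega), if_pos hca, if_pos (by omega), hca.2]
    · by_cases hx : r = row ∧ a + 1 ≤ c ∧ c < s + n
      · rw [if_pos hx, if_pos (by omega)]
      · rw [if_neg hx, if_neg hca, if_neg (by omega)]

theorem pvRowFold (lines : List String) (L s n : Int) (m : Nat) :
    ∀ (a i : Int) (f : Int → Int → Bool),
      0 ≤ s → s + n ≤ L → s ≤ a → a + m = s + n → i = a - s →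
      ((PySem.List.pyRange a (s + n) 1).foldl
          (fun (st : List (List (List Bool)) × Int) row =>
            (((PySem.List.pyRange s (s + n) 1).foldl
                (fun (st2 : List (List (List Bool)) × Int) col =>
                  (pvSet3 st2.1 s row col (pvCell lines st.2 st2.2), st2.2 + 1))
                (st.1, 0)).1, st.2 + 1))
          (pvGridF L s f, i)).1
        = pvGridF L s (fun r c =>
            if (a ≤ r ∧ r < s + n) ∧ (s ≤ c ∧ c < s + n) then pvCell lines (r - s) (c - s)
            else f r c) := by
  induction m with
  | zero =>
    intro a i f h1 h2 h3 h4 h5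
    rw [show PySem.List.pyRange a (s + n) 1 = [] from PySem.List.pyRange_one_eq_nil (by omega)]
    simp only [List.foldl_nil]
    congr 1
    funext r c
    rw [if_neg (by omega)]
  | succ m ih =>
    intro a i f h1 h2 h3 h4 h5
    rw [PySem.List.pyRange_one_cons (by omega : a < s + n)]
    simp only [List.foldl_cons]
    rw [pvColFold lines L s n i a ((s + n - s).toNat) s 0 f h1 h2 le_rfl (by omega) (by omega)
      (by omega) (by omega)]
    rw [ih (a + 1) (i + 1) _ h1 h2 (by omega) (by omega) (by omega)]
    congr 1
    funext r c
    subst h5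
    by_cases hra : r = a ∧ s ≤ c ∧ c < s + n
    · rw [if_neg (by omega), if_pos hra, if_pos (by omega), hra.1]
    · by_cases hx : (a + 1 ≤ r ∧ r < s + n) ∧ s ≤ c ∧ c < s + n
      · rw [if_pos hx, if_pos (by omega)]
      · rw [if_neg hx, if_neg hra, if_neg (by omega)]

-- A's patched grid (in pvGridF form) IS B's block concatenation
theorem pvGridF_eq_blocks (lines : List String) (L s : Int)
    (hs0 : 0 ≤ s) (hpos : lines.length ≠ 0) (hsn : s + (lines.length : Int) ≤ L) :
    pvGridF L s (fun r c =>
        if (s ≤ r ∧ r < s + (lines.length : Int)) ∧ (s ≤ c ∧ c < s + (lines.length : Int))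
        then pvCell lines (r - s) (c - s) else false)
      =
    ((PySem.List.pyRange 0 s 1).map (fun _ =>
        (PySem.List.pyRange 0 L 1).map (fun _ => List.replicate L.toNat false)))
    ++ [((PySem.List.pyRange 0 s 1).map (fun _ => List.replicate L.toNat false))
        ++ lines.map (fun line =>
             List.replicate s.toNat false
             ++ (PySem.List.pyRange 0 (lines.length : Int) 1).map
                  (fun j => PySem.List.pyGetD line.toList j ' ' == '#')
             ++ List.replicate (L - s - (lines.length : Int)).toNat false)
        ++ ((PySem.List.pyRange 0 (L - s - (lines.length : Int)) 1).map (fun _ =>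
              List.replicate L.toNat false))]
    ++ ((PySem.List.pyRange 0 (L - s - 1) 1).map (fun _ =>
          (PySem.List.pyRange 0 L 1).map (fun _ => List.replicate L.toNat false))) := by
  have hn1 : (1 : Int) ≤ (lines.length : Int) := by omega
  simp only [pvMapConst]
  unfold pvGridF
  refine pvWindow L s 1 _ _ _ ?_ hs0 (by omega) ?_ ?_ ?_
  · simp
  · -- planes below the centre: all blank
    intro z h0 hz
    have hzs : z ≠ s := by omega
    simp only [if_neg hzs, pvMapConst]
  · -- planes above the centre: all blank
    intro z hz hzL
    have hzs : z ≠ s := by omega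
    simp only [if_neg hzs, pvMapConst]
  · -- the centre plane
    intro k hk
    have hk0 : k = 0 := by simpa using hk
    subst hk0
    simp only [List.getElem_cons_zero, Nat.cast_zero, add_zero, eq_self_iff_true, if_true]
    refine pvWindow L s (lines.length : Int) _ _ _ ?_ hs0 hsn ?_ ?_ ?_
    · simp
    · -- rows above the pattern: blank
      intro r h0 hr
      rw [show (fun c => if (s ≤ r ∧ r < s + (lines.length : Int)) ∧
              (s ≤ c ∧ c < s + (lines.length : Int))
            then pvCell lines (r - s) (c - s) else false) = (fun _ : Int => false)
          from funext fun c => if_neg (by omega)]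
      exact pvMapConst L false
    · -- rows below the pattern: blank
      intro r hr hrL
      rw [show (fun c => if (s ≤ r ∧ r < s + (lines.length : Int)) ∧
              (s ≤ c ∧ c < s + (lines.length : Int))
            then pvCell lines (r - s) (c - s) else false) = (fun _ : Int => false)
          from funext fun c => if_neg (by omega)]
      exact pvMapConst L false
    · -- pattern row k comes from line k
      intro k hk
      rw [List.length_map] at hk
      rw [List.getElem_map]
      rw [show (fun c => if (s ≤ s + (k : Int) ∧ s + (k : Int) < s + (lines.length : Int)) ∧
              (s ≤ c ∧ c < s + (lines.length : Int))
            then pvCell lines (s + (k : Int) - s) (c - s) else false)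
          = (fun c : Int => if s ≤ c ∧ c < s + (lines.length : Int)
              then pvCell lines (k : Int) (c - s) else false) from funext fun c => by
            rw [show s + (k : Int) - s = (k : Int) by ring]
            by_cases h : s ≤ c ∧ c < s + (lines.length : Int)
            · rw [if_pos ⟨⟨by omega, by omega⟩, h⟩, if_pos h]
            · rw [if_neg (fun hh => h hh.2), if_neg h]]
      refine pvWindow L s (lines.length : Int) _ _ _ ?_ hs0 hsn ?_ ?_ ?_
      · rw [List.length_map, PySem.List.length_pyRange_one]; omega
      · intro c h0 hc
        rw [if_neg (by omega)]
      · intro c hc hcL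
        rw [if_neg (by omega)]
      · intro j hj
        rw [List.length_map, PySem.List.length_pyRange_one] at hj
        rw [if_pos ⟨by omega, by omega⟩]
        rw [show s + (j : Int) - s = (j : Int) by ring]
        rw [List.getElem_map, PySem.List.getElem_pyRange_one]
        unfold pvCell
        simp only [zero_add, PySem.List.pyGetD_natCast]
        rw [List.getD_eq_getElem lines "" hk]

theorem prepare_grid_spec : Claim_equal_prepare_grid := by
  intro lines cycles _hdom hpre
  obtain ⟨hnil, -⟩ := hpre
  unfold Spec_prepare_grid
  by_cases hn0 : lines.length = 0
  · -- no input lines: both grids are entirely blank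
    have hl : lines = [] := List.length_eq_zero_iff.mp hn0
    subst hl
    simp only [prepare_grid, prepare_grid_alt,
      PySem.List.foldl_append_singleton_eq_map, List.nil_append,
      List.length_nil, Nat.cast_zero, zero_add, add_zero]
    rw [PySem.List.pyRange_one_eq_nil le_rfl]
    simp only [List.foldl_nil, pvMapConst, if_true]
  · -- nonempty input: A = pvGridF with the centre window, = B's blocks
    have hne : lines ≠ [] := fun h => hn0 (by simp [h])
    have hcyc : 0 ≤ cycles := hnil.resolve_left hne
    have hL : (0 : Int) ≤ (lines.length : Int) + cycles * 2 := by omega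
    simp only [prepare_grid, prepare_grid_alt, if_neg hn0,
      PySem.List.foldl_append_singleton_eq_map, List.nil_append,
      List.length_map, PySem.List.length_pyRange_one, sub_zero,
      Int.toNat_of_nonneg hL,
      PySem.Int.floordiv_eq_ediv_of_pos (show (0:Int) < 2 by norm_num)]
    set n : Int := (lines.length : Int) with hn
    set L : Int := n + cycles * 2 with hLdef
    set s : Int := L / 2 - n / 2 with hsdef
    have hs0 : 0 ≤ s := by omega
    have hsn : s + n ≤ L := by omega
    rw [show (List.map
        (fun _z => List.map (fun _r => List.map (fun _c => false) (PySem.List.pyRange 0 L))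
          (PySem.List.pyRange 0 L))
        (PySem.List.pyRange 0 L)) = pvGridF L s (fun _ _ => false) by simp [pvGridF]]
    rw [pvRowFold lines L s n lines.length s 0 (fun _ _ => false) hs0 hsn le_rfl (by omega)
      (by omega)]
    exact pvGridF_eq_blocks lines L s hs0 hn0 hsn
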